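-- pv_equiv track=rewrite | github.com/kon6443/Algorithms | BaekJoon/1260.py | findConnectedVertex
-- ===== SOURCE A (Python) =====
-- def findConnectedVertex(target, list):
--     return_value = []
--     for i in range(len(list)):
--         if(list[i][0]==target):
--             return_value.append(list[i][1])
--         elif(list[i][1]==target):
--             return_value.append(list[i][0])
--     return findMinInList(return_value)
--
-- def findMinInList(list):
--     return_value = list[0]
--     for item in list:
--         if(return_value>item):
--             return_value = item
--     return return_value
-- ===== SOURCE B (Python) =====
-- def findConnectedVertex(target, list):
--     neighbours = [edge[1] if edge[0] == target else edge[0]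
--                   for edge in list
--                   if edge[0] == target or edge[1] == target]
--     return sorted(neighbours)[0]
-- ===== Notes on version B (the rewrite author's own statement) =====
-- stated objective: simpler
-- what changed: Replaces A's index loop with two append branches plus a separate hand-written running-minimum helper by a single comprehension over the edges followed by sorted(neighbours)[0].
import Mathlib
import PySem

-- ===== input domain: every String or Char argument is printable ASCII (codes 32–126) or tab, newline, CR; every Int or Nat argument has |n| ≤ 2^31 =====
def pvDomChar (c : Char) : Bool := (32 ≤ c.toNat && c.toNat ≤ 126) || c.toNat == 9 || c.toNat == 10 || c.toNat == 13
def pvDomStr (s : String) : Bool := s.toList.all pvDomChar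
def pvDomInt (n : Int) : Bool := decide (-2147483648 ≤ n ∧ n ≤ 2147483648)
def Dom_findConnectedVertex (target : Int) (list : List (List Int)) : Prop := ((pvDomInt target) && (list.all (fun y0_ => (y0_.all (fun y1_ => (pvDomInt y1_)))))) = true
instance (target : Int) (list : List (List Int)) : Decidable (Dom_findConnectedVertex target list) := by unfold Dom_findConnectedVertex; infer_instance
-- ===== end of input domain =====

-- B replaces A's explicit loop + hand-written running-minimum scan by a single
-- comprehension over the edges followed by sorted(...)[0] (objective: simpler).

-- ===== PORT A =====
def findMinInList (l : List Int) : Int :=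
  let rv := (PySem.List.pyGet? l 0).getD 0
  l.foldl (fun rv item => if rv > item then item else rv) rv

def findConnectedVertex (target : Int) (list : List (List Int)) : Int :=
  let rv := (PySem.List.pyRange 0 (list.length : Int) 1).foldl (fun acc i =>
    let e := PySem.List.pyGetD list i []
    if PySem.List.pyGetD e 0 0 == target then acc ++ [PySem.List.pyGetD e 1 0]
    else if PySem.List.pyGetD e 1 0 == target then acc ++ [PySem.List.pyGetD e 0 0]
    else acc) []
  findMinInList rv

-- ===== PORT B =====
def findConnectedVertex_alt (target : Int) (list : List (List Int)) : Int :=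
  let neighbours := (list.filter (fun e =>
      PySem.List.pyGetD e 0 0 == target || PySem.List.pyGetD e 1 0 == target)).map
    (fun e => if PySem.List.pyGetD e 0 0 == target then PySem.List.pyGetD e 1 0
              else PySem.List.pyGetD e 0 0)
  (PySem.List.pyGet? (PySem.List.sorted neighbours (fun x => x) false) 0).getD 0

-- ===== PRECONDITION & SPEC =====
-- Pre_ excludes exactly the inputs on which A raises IndexError: an edge with fewer
-- than two entries, or a target incident to no edge (empty neighbour list, list[0]).
def Pre_findConnectedVertex (target : Int) (list : List (List Int)) : Prop :=
  (∀ e ∈ list, 2 ≤ e.length) ∧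
  ∃ e ∈ list, PySem.List.pyGetD e 0 0 = target ∨ PySem.List.pyGetD e 1 0 = target
instance (target : Int) (list : List (List Int)) : Decidable (Pre_findConnectedVertex target list) := by
  unfold Pre_findConnectedVertex; infer_instance

def pvWitness_findConnectedVertex : Int × List (List Int) := (1, [[1, 2], [3, 1]])

def Spec_findConnectedVertex (target : Int) (list : List (List Int)) (out : Int) : Prop := out = findConnectedVertex_alt target list
instance (target : Int) (list : List (List Int)) (out : Int) : Decidable (Spec_findConnectedVertex target list out) := by unfold Spec_findConnectedVertex; infer_instance

-- ===== CLAIM (what is proved, stated in full; the proofs are below) =====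
def Claim_equal_findConnectedVertex : Prop := ∀ (target : Int) (list : List (List Int)), Dom_findConnectedVertex target list → Pre_findConnectedVertex target list → Spec_findConnectedVertex target list (findConnectedVertex target list)

-- ===== LEMMAS AND PROOFS =====

theorem foldlMin_le_init (l : List Int) (a : Int) :
    l.foldl (fun rv item => if rv > item then item else rv) a ≤ a := by
  induction l generalizing a with
  | nil => exact le_refl a
  | cons x t ih =>
    simp only [List.foldl_cons]
    refine le_trans (ih _) ?_
    split <;> omega

theorem foldlMin_le_mem (l : List Int) (a x : Int) (hx : x ∈ l) :
    l.foldl (fun rv item => if rv > item then item else rv) a ≤ x := by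
  induction l generalizing a with
  | nil => cases hx
  | cons y t ih =>
    simp only [List.foldl_cons]
    rcases List.mem_cons.mp hx with h | h
    · subst h
      refine le_trans (foldlMin_le_init t _) ?_
      split <;> omega
    · exact ih _ h

theorem foldlMin_mem (l : List Int) (a : Int) :
    l.foldl (fun rv item => if rv > item then item else rv) a = a ∨
    l.foldl (fun rv item => if rv > item then item else rv) a ∈ l := by
  induction l generalizing a with
  | nil => exact Or.inl rfl
  | cons x t ih =>
    simp only [List.foldl_cons]
    rcases ih (if a > x then x else a) with h | h
    · rw [h]
      by_cases hax : a > x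
      · simp [hax]
      · simp [hax]
    · exact Or.inr (List.mem_cons_of_mem _ h)

-- A's loop body, re-expressed in the 'if p then acc ++ [f x] else acc' shape
theorem stepEq (target : Int) :
    (fun (acc : List Int) (e : List Int) =>
      if PySem.List.pyGetD e 0 0 == target then acc ++ [PySem.List.pyGetD e 1 0]
      else if PySem.List.pyGetD e 1 0 == target then acc ++ [PySem.List.pyGetD e 0 0]
      else acc)
    = (fun acc e =>
      if (PySem.List.pyGetD e 0 0 == target || PySem.List.pyGetD e 1 0 == target)
      then acc ++ [if PySem.List.pyGetD e 0 0 == target then PySem.List.pyGetD e 1 0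
                   else PySem.List.pyGetD e 0 0]
      else acc) := by
  funext acc e
  by_cases h0 : PySem.List.pyGetD e 0 0 = target <;>
    by_cases h1 : PySem.List.pyGetD e 1 0 = target <;> simp [h0, h1]

-- ===== VERDICT =====
theorem findConnectedVertex_spec : Claim_equal_findConnectedVertex := by
  intro target list _ hpre
  unfold Spec_findConnectedVertex findConnectedVertex findConnectedVertex_alt
  rw [PySem.List.foldl_pyRange_zero_pyGetD' list ([] : List Int)
        (fun acc e =>
          if PySem.List.pyGetD e 0 0 == target then acc ++ [PySem.List.pyGetD e 1 0]
          else if PySem.List.pyGetD e 1 0 == target then acc ++ [PySem.List.pyGetD e 0 0]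
          else acc) []]
  rw [stepEq target, PySem.List.foldl_append_if]
  set ns := (list.filter (fun e =>
      PySem.List.pyGetD e 0 0 == target || PySem.List.pyGetD e 1 0 == target)).map
    (fun e => if PySem.List.pyGetD e 0 0 == target then PySem.List.pyGetD e 1 0
              else PySem.List.pyGetD e 0 0) with hns
  simp only [List.nil_append]
  -- ns is nonempty
  obtain ⟨hlen, e, he, hcond⟩ := hpre
  have hne : ns ≠ [] := by
    have : (if PySem.List.pyGetD e 0 0 == target then PySem.List.pyGetD e 1 0
            else PySem.List.pyGetD e 0 0) ∈ ns := by
      rw [hns]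
      refine List.mem_map_of_mem (List.mem_filter.mpr ⟨he, ?_⟩)
      rcases hcond with h | h <;> simp [h]
    intro h; rw [h] at this; cases this
  cases hsn : PySem.List.sorted ns (fun x => x) false with
  | nil => exact absurd ((PySem.List.sorted_eq_nil_iff _ _ _).mp hsn) hne
  | cons m t' =>
    have hm_mem : m ∈ ns := by
      have : m ∈ PySem.List.sorted ns (fun x => x) false := by rw [hsn]; exact List.mem_cons_self
      exact (PySem.List.mem_sorted _ _ _ _).mp this
    have hm_le : ∀ y ∈ ns, m ≤ y := PySem.List.key_head_sorted_le ns (fun x => x) hsn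
    cases hcase : ns with
    | nil => exact absurd hcase hne
    | cons n rest =>
      rw [hcase] at hm_mem hm_le
      simp only [findMinInList, PySem.List.pyGet?_zero_cons, Option.getD_some]
      set M := (n :: rest).foldl (fun rv item => if rv > item then item else rv) n with hM
      have hM_mem : M ∈ n :: rest := by
        rcases foldlMin_mem (n :: rest) n with h | h
        · rw [hM, h]; exact List.mem_cons_self
        · exact h
      have h1 : M ≤ m := foldlMin_le_mem (n :: rest) n m hm_mem
      have h2 : m ≤ M := hm_le M hM_mem
      omega
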